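-- pv_equiv track=rewrite | github.com/danilnev/yandex_lyceum | Lesson 22. Function (return)/additional_5_shadow_know_your_place.py | make_shades
-- ===== SOURCE A (Python) =====
-- def make_shades(alley: list[int], k: int) -> list[bool]:
--     alley_places = [False for i in range(len(alley))]
--     if k > 0:
--         for i in range(len(alley)):
--             if alley[i] != 0:
--                 metres = k * alley[i] + 1
--                 for j in range(0, metres):
--                     if j + i >= len(alley):
--                         break
--                     alley_places[j + i] = True
--     elif k == 0:
--         for i in range(len(alley)):
--             if alley[i] > 0:
--                 alley_places[i] = True
--     elif k < 0:
--         for i in range(len(alley)):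
--             if alley[i] != 0:
--                 metres = abs(k) * alley[i] + 1
--                 for j in range(0, metres):
--                     if (i - j) >= 0:
--                         alley_places[i - j] = True
--     return alley_places
-- ===== SOURCE B (Python) =====
-- def make_shades(alley: list[int], k: int) -> list[bool]:
--     n = len(alley)
--     diff = [0] * (n + 1)
--     for i in range(n):
--         h = alley[i]
--         if h > 0:
--             lo = i if k >= 0 else max(0, i + k * h)
--             hi = min(n, i + k * h + 1) if k >= 0 else i + 1
--             diff[lo] += 1
--             diff[hi] -= 1
--     result = []
--     c = 0
--     for i in range(n):
--         c += diff[i]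
--         result.append(c > 0)
--     return result
-- ===== Notes on version B (the rewrite author's own statement) =====
-- stated objective: alternative
-- what changed: A paints every shaded cell of every tree's interval with nested loops; B records each tree's shaded interval as +1/-1 in a difference array and recovers the covered cells with a single prefix-sum pass.
import Mathlib
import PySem

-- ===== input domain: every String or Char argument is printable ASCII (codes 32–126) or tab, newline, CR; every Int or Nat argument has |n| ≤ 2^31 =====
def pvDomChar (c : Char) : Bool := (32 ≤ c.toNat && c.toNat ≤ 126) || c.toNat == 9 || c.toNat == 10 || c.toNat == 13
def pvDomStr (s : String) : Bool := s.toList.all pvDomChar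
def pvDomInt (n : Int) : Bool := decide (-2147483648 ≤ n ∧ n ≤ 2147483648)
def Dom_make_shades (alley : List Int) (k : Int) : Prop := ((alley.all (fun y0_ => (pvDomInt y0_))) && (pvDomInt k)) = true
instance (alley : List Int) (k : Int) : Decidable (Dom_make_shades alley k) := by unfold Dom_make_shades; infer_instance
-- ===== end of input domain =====

-- B replaces A's per-tree interval-painting loops by a difference array (+1/-1 at interval ends) with one prefix-sum pass.

-- ===== PORT A =====
-- inner 'for j in range(0, metres): if j + i >= len(alley): break; alley_places[j+i] = True'
def fwdInner (n i : Int) (j metres : Int) (places : List Bool) : List Bool :=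
  if _hj : j < metres then
    if j + i ≥ n then places
    else fwdInner n i (j + 1) metres (PySem.List.pySetD places (j + i) true)
  else places
termination_by (metres - j).toNat
decreasing_by omega

def make_shades (alley : List Int) (k : Int) : List Bool :=
  let n : Int := (alley.length : Int)
  let places0 : List Bool := List.replicate alley.length false
  if k > 0 then
    (PySem.List.pyRange 0 n 1).foldl (fun places i =>
      if PySem.List.pyGetD alley i 0 ≠ 0 then
        fwdInner n i 0 (k * PySem.List.pyGetD alley i 0 + 1) places
      else places) places0
  else if k = 0 then
    (PySem.List.pyRange 0 n 1).foldl (fun places i =>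
      if PySem.List.pyGetD alley i 0 > 0 then PySem.List.pySetD places i true else places) places0
  else
    (PySem.List.pyRange 0 n 1).foldl (fun places i =>
      if PySem.List.pyGetD alley i 0 ≠ 0 then
        (PySem.List.pyRange 0 (|k| * PySem.List.pyGetD alley i 0 + 1) 1).foldl
          (fun places j => if i - j ≥ 0 then PySem.List.pySetD places (i - j) true else places) places
      else places) places0

-- ===== PORT B =====
-- diff[lo] += 1; diff[hi] -= 1 for the shaded interval [lo, hi) of tree i of height h
def diffMark (n k : Int) (diff : List Int) (i h : Int) : List Int :=
  if h > 0 then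
    let lo : Int := if k ≥ 0 then i else max 0 (i + k * h)
    let hi : Int := if k ≥ 0 then min n (i + k * h + 1) else i + 1
    let d1 := PySem.List.pySetD diff lo (PySem.List.pyGetD diff lo 0 + 1)
    PySem.List.pySetD d1 hi (PySem.List.pyGetD d1 hi 0 - 1)
  else diff

def make_shades_alt (alley : List Int) (k : Int) : List Bool :=
  let n : Int := (alley.length : Int)
  let diff0 : List Int := List.replicate (alley.length + 1) 0
  let diff := (PySem.List.pyRange 0 n 1).foldl
    (fun d i => diffMark n k d i (PySem.List.pyGetD alley i 0)) diff0
  ((PySem.List.pyRange 0 n 1).foldl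
    (fun (st : Int × List Bool) i =>
      let c := st.1 + PySem.List.pyGetD diff i 0
      (c, st.2 ++ [decide (c > 0)])) (0, [])).2

-- ===== PRECONDITION & SPEC =====
def Spec_make_shades (alley : List Int) (k : Int) (out : List Bool) : Prop := out = make_shades_alt alley k
instance (alley : List Int) (k : Int) (out : List Bool) : Decidable (Spec_make_shades alley k out) := by unfold Spec_make_shades; infer_instance

-- ===== CLAIM (what is proved, stated in full; the proofs are below) =====
def Claim_equal_make_shades : Prop := ∀ (alley : List Int) (k : Int), Dom_make_shades alley k → Spec_make_shades alley k (make_shades alley k)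

-- ===== LEMMAS AND PROOFS =====

theorem getD_set' {α : Type} (l : List α) (q t : Nat) (v d : α) :
    (l.set q v).getD t d = if q = t ∧ q < l.length then v else l.getD t d := by
  simp only [List.getD_eq_getElem?_getD, List.getElem?_set]
  split_ifs with h1 h2 h3 <;> simp_all
  omega

theorem fwdInner_spec {N : Nat} (i : Int) (hi : 0 ≤ i) (b : Int) :
    ∀ (a : Int), 0 ≤ a → ∀ places : List Bool, places.length = N →
    (fwdInner (N:Int) i a b places).length = N ∧
    ∀ p : Nat, p < N → (fwdInner (N:Int) i a b places).getD p false =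
      (places.getD p false || decide (i + a ≤ (p:Int) ∧ (p:Int) ≤ i + b - 1)) := by
  suffices H : ∀ (m : Nat) (a : Int), (b - a).toNat ≤ m → 0 ≤ a → ∀ places : List Bool, places.length = N →
      (fwdInner (N:Int) i a b places).length = N ∧
      ∀ p : Nat, p < N → (fwdInner (N:Int) i a b places).getD p false =
        (places.getD p false || decide (i + a ≤ (p:Int) ∧ (p:Int) ≤ i + b - 1)) by
    exact fun a => H (b - a).toNat a le_rfl
  intro m
  induction m with
  | zero =>
    intro a hm ha places hl
    have hba : b ≤ a := by omega
    rw [fwdInner, dif_neg (by omega)]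
    refine ⟨hl, fun p hp => ?_⟩
    have hfalse : ¬ (i + a ≤ (p:Int) ∧ (p:Int) ≤ i + b - 1) := by omega
    rw [decide_eq_false hfalse, Bool.or_false]
  | succ m ih =>
    intro a hm ha places hl
    by_cases hba : b ≤ a
    · rw [fwdInner, dif_neg (by omega)]
      refine ⟨hl, fun p hp => ?_⟩
      have hfalse : ¬ (i + a ≤ (p:Int) ∧ (p:Int) ≤ i + b - 1) := by omega
      rw [decide_eq_false hfalse, Bool.or_false]
    · have hab : a < b := by omega
      by_cases hbrk : a + i ≥ (N:Int)
      · rw [fwdInner, dif_pos hab, if_pos hbrk]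
        refine ⟨hl, fun p hp => ?_⟩
        have hfalse : ¬ (i + a ≤ (p:Int) ∧ (p:Int) ≤ i + b - 1) := by omega
        rw [decide_eq_false hfalse, Bool.or_false]
      · have hset : PySem.List.pySetD places (a + i) true = places.set (a + i).toNat true :=
          PySem.List.pySetD_of_nonneg places true (by omega)
        have hl' : (places.set (a + i).toNat true).length = N := by simpa using hl
        have ihres := ih (a + 1) (by omega) (by omega) (places.set (a + i).toNat true) hl'
        rw [fwdInner, dif_pos hab, if_neg hbrk, hset]
        refine ⟨ihres.1, fun p hp => ?_⟩
        rw [ihres.2 p hp, getD_set' places _ p true false, hl]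
        by_cases hc : (p:Int) = a + i
        · rw [if_pos (by omega), decide_eq_true (show i + a ≤ (p:Int) ∧ (p:Int) ≤ i + b - 1 by omega),
            Bool.true_or, Bool.or_true]
        · rw [if_neg (by omega),
            decide_eq_decide.mpr (show (i + (a+1) ≤ (p:Int) ∧ (p:Int) ≤ i + b - 1) ↔ (i + a ≤ (p:Int) ∧ (p:Int) ≤ i + b - 1) by omega)]

theorem foldl_mark {g : Int → Nat → Bool} {N : Nat} (f : List Bool → Int → List Bool) :
    ∀ (js : List Int) (places : List Bool), places.length = N →
    (∀ (pl : List Bool) (i : Int), i ∈ js → pl.length = N →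
      (f pl i).length = N ∧ ∀ p : Nat, p < N → (f pl i).getD p false = (pl.getD p false || g i p)) →
    (js.foldl f places).length = N ∧
      ∀ p : Nat, p < N → (js.foldl f places).getD p false = (places.getD p false || js.any (fun i => g i p)) := by
  intro js
  induction js with
  | nil => intro places hl _; simpa using hl
  | cons j rest ih =>
    intro places hl hf
    have hstep := hf places j (by simp) hl
    have hrest := ih (f places j) hstep.1 (fun pl i hi hpl => hf pl i (by simp [hi]) hpl)
    refine ⟨hrest.1, fun p hp => ?_⟩
    simp only [List.foldl_cons, List.any_cons]
    rw [hrest.2 p hp, (hstep.2 p hp), Bool.or_assoc]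

theorem bwd_spec {N : Nat} (i : Int) (b : Int) :
    ∀ (a : Int), 0 ≤ a → ∀ places : List Bool, places.length = N →
    ((PySem.List.pyRange a b 1).foldl
      (fun pl j => if i - j ≥ 0 then PySem.List.pySetD pl (i - j) true else pl) places).length = N ∧
    ∀ p : Nat, p < N → ((PySem.List.pyRange a b 1).foldl
      (fun pl j => if i - j ≥ 0 then PySem.List.pySetD pl (i - j) true else pl) places).getD p false =
      (places.getD p false || decide (i - b + 1 ≤ (p:Int) ∧ (p:Int) ≤ i - a)) := by
  suffices H : ∀ (m : Nat) (a : Int), (b - a).toNat ≤ m → 0 ≤ a → ∀ places : List Bool, places.length = N →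
      ((PySem.List.pyRange a b 1).foldl
        (fun pl j => if i - j ≥ 0 then PySem.List.pySetD pl (i - j) true else pl) places).length = N ∧
      ∀ p : Nat, p < N → ((PySem.List.pyRange a b 1).foldl
        (fun pl j => if i - j ≥ 0 then PySem.List.pySetD pl (i - j) true else pl) places).getD p false =
        (places.getD p false || decide (i - b + 1 ≤ (p:Int) ∧ (p:Int) ≤ i - a)) by
    exact fun a => H (b - a).toNat a le_rfl
  intro m
  induction m with
  | zero =>
    intro a hm ha places hl
    rw [PySem.List.pyRange_one_eq_nil (by omega)]
    refine ⟨hl, fun p hp => ?_⟩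
    rw [decide_eq_false (show ¬ (i - b + 1 ≤ (p:Int) ∧ (p:Int) ≤ i - a) by omega), Bool.or_false]
    rfl
  | succ m ih =>
    intro a hm ha places hl
    by_cases hba : b ≤ a
    · rw [PySem.List.pyRange_one_eq_nil hba]
      refine ⟨hl, fun p hp => ?_⟩
      rw [decide_eq_false (show ¬ (i - b + 1 ≤ (p:Int) ∧ (p:Int) ≤ i - a) by omega), Bool.or_false]
      rfl
    · have hab : a < b := by omega
      rw [PySem.List.pyRange_one_cons hab, List.foldl_cons]
      by_cases hneg : i - a ≥ 0
      · have hset : (if i - a ≥ 0 then PySem.List.pySetD places (i - a) true else places)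
            = places.set (i - a).toNat true := by
          rw [if_pos hneg, PySem.List.pySetD_of_nonneg places true (by omega)]
        rw [hset]
        have hl' : (places.set (i - a).toNat true).length = N := by simpa using hl
        have ihres := ih (a + 1) (by omega) (by omega) (places.set (i - a).toNat true) hl'
        refine ⟨ihres.1, fun p hp => ?_⟩
        rw [ihres.2 p hp, getD_set' places _ p true false, hl]
        by_cases hc : (p:Int) = i - a
        · rw [if_pos (by omega), decide_eq_true (show i - b + 1 ≤ (p:Int) ∧ (p:Int) ≤ i - a by omega),
            Bool.true_or, Bool.or_true]
        · rw [if_neg (by omega),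
            decide_eq_decide.mpr (show (i - b + 1 ≤ (p:Int) ∧ (p:Int) ≤ i - (a+1)) ↔ (i - b + 1 ≤ (p:Int) ∧ (p:Int) ≤ i - a) by omega)]
      · rw [if_neg hneg]
        have ihres := ih (a + 1) (by omega) (by omega) places hl
        refine ⟨ihres.1, fun p hp => ?_⟩
        rw [ihres.2 p hp,
          decide_eq_decide.mpr (show (i - b + 1 ≤ (p:Int) ∧ (p:Int) ≤ i - (a+1)) ↔ (i - b + 1 ≤ (p:Int) ∧ (p:Int) ≤ i - a) by omega)]

def covI (alley : List Int) (k : Int) (i : Int) (p : Nat) : Bool :=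
  decide (0 < PySem.List.pyGetD alley i 0 ∧
    min i (i + k * PySem.List.pyGetD alley i 0) ≤ (p : Int) ∧
    (p : Int) ≤ max i (i + k * PySem.List.pyGetD alley i 0))

theorem A_char (alley : List Int) (k : Int) :
    (make_shades alley k).length = alley.length ∧
    ∀ p : Nat, p < alley.length →
      (make_shades alley k).getD p false =
        (PySem.List.pyRange 0 (alley.length : Int) 1).any (fun i => covI alley k i p) := by
  have hpl0 : (List.replicate alley.length false).length = alley.length := by simp
  have hg0 : ∀ p : Nat, (List.replicate alley.length false).getD p false = false := by
    intro p; simp [List.getD_eq_getElem?_getD]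
  by_cases hk : k > 0
  · have hf : ∀ (pl : List Bool) (i : Int), i ∈ PySem.List.pyRange 0 (alley.length : Int) 1 →
        pl.length = alley.length →
        ((if PySem.List.pyGetD alley i 0 ≠ 0 then
            fwdInner (alley.length : Int) i 0 (k * PySem.List.pyGetD alley i 0 + 1) pl
          else pl).length = alley.length ∧
          ∀ p : Nat, p < alley.length →
            (if PySem.List.pyGetD alley i 0 ≠ 0 then
              fwdInner (alley.length : Int) i 0 (k * PySem.List.pyGetD alley i 0 + 1) pl
            else pl).getD p false = (pl.getD p false || covI alley k i p)) := by
      intro pl i hi hl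
      rw [PySem.List.mem_pyRange_one] at hi
      by_cases hz : PySem.List.pyGetD alley i 0 = 0
      · rw [if_neg (by simpa using hz)]
        refine ⟨hl, fun p hp => ?_⟩
        rw [covI, decide_eq_false (by rw [hz]; omega), Bool.or_false]
      · rw [if_pos hz]
        have hsp := fwdInner_spec i hi.1 (k * PySem.List.pyGetD alley i 0 + 1) 0 le_rfl pl hl
        refine ⟨hsp.1, fun p hp => ?_⟩
        rw [hsp.2 p hp, covI]
        by_cases hh : 0 < PySem.List.pyGetD alley i 0
        · have hK : 0 < k * PySem.List.pyGetD alley i 0 := mul_pos hk hh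
          congr 1
          exact decide_eq_decide.mpr (by
            generalize k * PySem.List.pyGetD alley i 0 = K at hK ⊢
            constructor
            · intro h; exact ⟨hh, by omega, by omega⟩
            · intro h; omega)
        · have hK : k * PySem.List.pyGetD alley i 0 < 0 :=
            mul_neg_of_pos_of_neg hk (by omega)
          rw [decide_eq_false (by generalize k * PySem.List.pyGetD alley i 0 = K at hK ⊢; omega),
            decide_eq_false (by intro h; exact hh h.1)]
    have hm := foldl_mark _ (PySem.List.pyRange 0 (alley.length : Int) 1)
      (List.replicate alley.length false) hpl0 hf
    rw [make_shades]
    simp only [if_pos hk]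
    exact ⟨hm.1, fun p hp => by rw [hm.2 p hp, hg0 p, Bool.false_or]⟩
  · by_cases hk0 : k = 0
    · subst hk0
      have hf : ∀ (pl : List Bool) (i : Int), i ∈ PySem.List.pyRange 0 (alley.length : Int) 1 →
          pl.length = alley.length →
          ((if PySem.List.pyGetD alley i 0 > 0 then PySem.List.pySetD pl i true else pl).length = alley.length ∧
            ∀ p : Nat, p < alley.length →
              (if PySem.List.pyGetD alley i 0 > 0 then PySem.List.pySetD pl i true else pl).getD p false =
                (pl.getD p false || covI alley 0 i p)) := by
        intro pl i hi hl
        rw [PySem.List.mem_pyRange_one] at hi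
        by_cases hh : PySem.List.pyGetD alley i 0 > 0
        · rw [if_pos hh, PySem.List.pySetD_of_nonneg pl true hi.1]
          refine ⟨by simpa using hl, fun p hp => ?_⟩
          rw [getD_set' pl _ p true false, hl, covI]
          by_cases hc : (p : Int) = i
          · rw [if_pos (by omega), decide_eq_true (by refine ⟨hh, ?_, ?_⟩ <;> omega),
              Bool.or_true]
          · rw [if_neg (by omega), decide_eq_false (by intro h; omega), Bool.or_false]
        · rw [if_neg hh]
          refine ⟨hl, fun p hp => ?_⟩
          rw [covI, decide_eq_false (by intro h; exact hh h.1), Bool.or_false]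
      have hm := foldl_mark _ (PySem.List.pyRange 0 (alley.length : Int) 1)
        (List.replicate alley.length false) hpl0 hf
      rw [make_shades]
      simp only [if_neg hk, reduceIte]
      exact ⟨hm.1, fun p hp => by rw [hm.2 p hp, hg0 p, Bool.false_or]⟩
    · have hkneg : k < 0 := by omega
      have hf : ∀ (pl : List Bool) (i : Int), i ∈ PySem.List.pyRange 0 (alley.length : Int) 1 →
          pl.length = alley.length →
          ((if PySem.List.pyGetD alley i 0 ≠ 0 then
              (PySem.List.pyRange 0 (|k| * PySem.List.pyGetD alley i 0 + 1) 1).foldl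
                (fun pl' j => if i - j ≥ 0 then PySem.List.pySetD pl' (i - j) true else pl') pl
            else pl).length = alley.length ∧
            ∀ p : Nat, p < alley.length →
              (if PySem.List.pyGetD alley i 0 ≠ 0 then
                (PySem.List.pyRange 0 (|k| * PySem.List.pyGetD alley i 0 + 1) 1).foldl
                  (fun pl' j => if i - j ≥ 0 then PySem.List.pySetD pl' (i - j) true else pl') pl
              else pl).getD p false = (pl.getD p false || covI alley k i p)) := by
        intro pl i hi hl
        rw [PySem.List.mem_pyRange_one] at hi
        by_cases hz : PySem.List.pyGetD alley i 0 = 0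
        · rw [if_neg (by simpa using hz)]
          refine ⟨hl, fun p hp => ?_⟩
          rw [covI, decide_eq_false (by rw [hz]; omega), Bool.or_false]
        · rw [if_pos hz]
          have habs : |k| = -k := abs_of_neg hkneg
          have hsp := bwd_spec i (|k| * PySem.List.pyGetD alley i 0 + 1) 0 le_rfl pl hl
          refine ⟨hsp.1, fun p hp => ?_⟩
          rw [hsp.2 p hp, covI]
          by_cases hh : 0 < PySem.List.pyGetD alley i 0
          · have hK : k * PySem.List.pyGetD alley i 0 < 0 := mul_neg_of_neg_of_pos hkneg hh
            have habs2 : |k| * PySem.List.pyGetD alley i 0 = -(k * PySem.List.pyGetD alley i 0) := by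
              rw [habs, neg_mul]
            congr 1
            exact decide_eq_decide.mpr (by
              rw [habs2]
              generalize k * PySem.List.pyGetD alley i 0 = K at hK ⊢
              constructor
              · intro h; exact ⟨hh, by omega, by omega⟩
              · intro h; omega)
          · have hK : 0 < k * PySem.List.pyGetD alley i 0 :=
              mul_pos_of_neg_of_neg hkneg (by omega)
            have habs2 : |k| * PySem.List.pyGetD alley i 0 = -(k * PySem.List.pyGetD alley i 0) := by
              rw [habs, neg_mul]
            rw [decide_eq_false (by
                rw [habs2]
                generalize k * PySem.List.pyGetD alley i 0 = K at hK ⊢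
                omega),
              decide_eq_false (by intro h; exact hh h.1)]
      have hm := foldl_mark _ (PySem.List.pyRange 0 (alley.length : Int) 1)
        (List.replicate alley.length false) hpl0 hf
      rw [make_shades]
      simp only [if_neg hk, if_neg hk0]
      exact ⟨hm.1, fun p hp => by rw [hm.2 p hp, hg0 p, Bool.false_or]⟩

def Spre (diff : List Int) (m : Nat) : Int := ∑ t ∈ Finset.range m, diff.getD t 0

theorem pyGetD_toD (xs : List Int) (i : Int) (h0 : 0 ≤ i) (h1 : i < (xs.length : Int)) :
    PySem.List.pyGetD xs i 0 = xs.getD i.toNat 0 := by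
  rw [PySem.List.pyGetD_eq_getElem xs 0 h0 h1, List.getD_eq_getElem xs 0 (by omega)]

theorem S_set (diff : List Int) (q : Nat) (δ : Int) (hq : q < diff.length) (m : Nat) :
    Spre (diff.set q (diff.getD q 0 + δ)) m = Spre diff m + if q < m then δ else 0 := by
  unfold Spre
  have hpt : ∀ t : Nat, (diff.set q (diff.getD q 0 + δ)).getD t 0
      = diff.getD t 0 + (if t = q then δ else 0) := by
    intro t
    rw [getD_set']
    by_cases h : q = t
    · rw [if_pos ⟨h, hq⟩, if_pos h.symm, h]
    · rw [if_neg (by tauto), if_neg (fun ht => h ht.symm), add_zero]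
  simp only [hpt, Finset.sum_add_distrib, Finset.sum_ite_eq' (Finset.range m) q]
  simp [Finset.mem_range]

theorem any_eq_pos_countP (l : List Int) (g : Int → Bool) :
    l.any g = decide (0 < ((l.countP g : Nat) : Int)) := by
  cases h : l.any g
  · have : l.countP g = 0 := by
      rw [List.countP_eq_zero]
      intro a ha
      have := List.any_eq_false.mp h a ha
      simpa using this
    simp [this]
  · obtain ⟨x, hx, hgx⟩ := List.any_eq_true.mp h
    have : 0 < l.countP g := List.countP_pos_iff.mpr ⟨x, hx, hgx⟩
    rw [eq_comm, decide_eq_true_iff]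
    exact_mod_cast this

theorem foldl_S {N : Nat} {g : Int → Nat → Bool} (f : List Int → Int → List Int) :
    ∀ (js : List Int) (diff : List Int), diff.length = N + 1 →
    (∀ (d : List Int) (i : Int), i ∈ js → d.length = N + 1 →
      (f d i).length = N + 1 ∧ ∀ p : Nat, p < N →
        Spre (f d i) (p+1) = Spre d (p+1) + (if g i p then 1 else 0)) →
    (js.foldl f diff).length = N + 1 ∧ ∀ p : Nat, p < N →
      Spre (js.foldl f diff) (p+1) = Spre diff (p+1) + ((js.countP (fun i => g i p) : Nat) : Int) := by
  intro js
  induction js with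
  | nil => intro diff hl _; exact ⟨hl, fun p hp => by simp⟩
  | cons j rest ih =>
    intro diff hl hf
    have hstep := hf diff j (by simp) hl
    have hrest := ih (f diff j) hstep.1 (fun d i hi hd => hf d i (by simp [hi]) hd)
    refine ⟨hrest.1, fun p hp => ?_⟩
    rw [List.foldl_cons, hrest.2 p hp, hstep.2 p hp, List.countP_cons]
    by_cases hg : g j p
    · simp only [hg, if_true]
      push_cast
      ring
    · simp [hg]

theorem diffMark_step (alley : List Int) (k : Int) (diff : List Int) (i : Int)
    (hi : 0 ≤ i ∧ i < (alley.length : Int)) (hl : diff.length = alley.length + 1) :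
    (diffMark (alley.length : Int) k diff i (PySem.List.pyGetD alley i 0)).length = alley.length + 1 ∧
    ∀ p : Nat, p < alley.length →
      Spre (diffMark (alley.length : Int) k diff i (PySem.List.pyGetD alley i 0)) (p+1)
        = Spre diff (p+1) + (if covI alley k i p then 1 else 0) := by
  by_cases hh : PySem.List.pyGetD alley i 0 > 0
  · have hmain : ∀ (lo hiV : Int), 0 ≤ lo → lo ≤ (alley.length : Int) → 0 ≤ hiV → hiV ≤ (alley.length : Int) →
        ∀ p : Nat, p < alley.length →
        Spre (PySem.List.pySetD
            (PySem.List.pySetD diff lo (PySem.List.pyGetD diff lo 0 + 1)) hiV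
            (PySem.List.pyGetD (PySem.List.pySetD diff lo (PySem.List.pyGetD diff lo 0 + 1)) hiV 0 - 1)) (p+1)
          = Spre diff (p+1) + (if lo ≤ (p:Int) then 1 else 0) + (if hiV ≤ (p:Int) then -1 else 0) := by
      intro lo hiV hlo0 hloN hhi0 hhiN p hp
      have hd1 : PySem.List.pySetD diff lo (PySem.List.pyGetD diff lo 0 + 1)
          = diff.set lo.toNat (diff.getD lo.toNat 0 + 1) := by
        rw [PySem.List.pySetD_of_nonneg diff _ hlo0, pyGetD_toD diff lo hlo0 (by omega)]
      set d1 := diff.set lo.toNat (diff.getD lo.toNat 0 + 1) with hd1def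
      have hld1 : d1.length = alley.length + 1 := by simp [hd1def, hl]
      have hd2 : PySem.List.pySetD d1 hiV (PySem.List.pyGetD d1 hiV 0 - 1)
          = d1.set hiV.toNat (d1.getD hiV.toNat 0 + (-1)) := by
        rw [PySem.List.pySetD_of_nonneg d1 _ hhi0, pyGetD_toD d1 hiV hhi0 (by omega), sub_eq_add_neg]
      rw [hd1, hd2, S_set d1 hiV.toNat (-1) (by omega) (p+1), hd1def,
        S_set diff lo.toNat 1 (by omega) (p+1)]
      split_ifs <;> omega
    rw [diffMark, if_pos hh]
    refine ⟨by simp [hl], fun p hp => ?_⟩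
    by_cases hk : k ≥ 0
    · simp only [if_pos hk]
      have hK : 0 ≤ k * PySem.List.pyGetD alley i 0 :=
        mul_nonneg hk (by omega)
      rw [hmain i (min (alley.length : Int) (i + k * PySem.List.pyGetD alley i 0 + 1))
        hi.1 (by omega) (by omega) (by omega) p hp, covI]
      generalize k * PySem.List.pyGetD alley i 0 = K at hK ⊢
      have hcv : (0 < PySem.List.pyGetD alley i 0 ∧ min i (i + K) ≤ (p:Int) ∧ (p:Int) ≤ max i (i + K))
          ↔ (i ≤ (p:Int) ∧ (p:Int) ≤ i + K) := by
        constructor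
        · intro h; omega
        · intro h; exact ⟨hh, by omega, by omega⟩
      rw [show (decide (0 < PySem.List.pyGetD alley i 0 ∧ min i (i + K) ≤ (p:Int) ∧ (p:Int) ≤ max i (i + K)))
          = (decide (i ≤ (p:Int) ∧ (p:Int) ≤ i + K)) from decide_eq_decide.mpr hcv]
      split_ifs with h1 h2 h3 <;> simp_all <;> omega
    · simp only [if_neg hk]
      have hK : k * PySem.List.pyGetD alley i 0 < 0 :=
        mul_neg_of_neg_of_pos (by omega) hh
      rw [hmain (max 0 (i + k * PySem.List.pyGetD alley i 0)) (i + 1)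
        (by omega) (by omega) (by omega) (by omega) p hp, covI]
      generalize k * PySem.List.pyGetD alley i 0 = K at hK ⊢
      have hcv : (0 < PySem.List.pyGetD alley i 0 ∧ min i (i + K) ≤ (p:Int) ∧ (p:Int) ≤ max i (i + K))
          ↔ (i + K ≤ (p:Int) ∧ (p:Int) ≤ i) := by
        constructor
        · intro h; omega
        · intro h; exact ⟨hh, by omega, by omega⟩
      rw [show (decide (0 < PySem.List.pyGetD alley i 0 ∧ min i (i + K) ≤ (p:Int) ∧ (p:Int) ≤ max i (i + K)))
          = (decide (i + K ≤ (p:Int) ∧ (p:Int) ≤ i)) from decide_eq_decide.mpr hcv]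
      split_ifs with h1 h2 h3 <;> simp_all <;> omega
  · rw [diffMark, if_neg hh]
    refine ⟨hl, fun p hp => ?_⟩
    rw [covI, decide_eq_false (fun h => hh h.1)]
    simp

theorem scan_spec (diff : List Int) (m : Nat) :
    ((PySem.List.pyRange 0 (m : Int) 1).foldl
      (fun (st : Int × List Bool) i =>
        let c := st.1 + PySem.List.pyGetD diff i 0
        (c, st.2 ++ [decide (c > 0)])) ((0 : Int), ([] : List Bool)))
    = (Spre diff m, (List.range m).map (fun p => decide (0 < Spre diff (p+1)))) := by
  induction m with
  | zero =>
    rw [show ((0:Nat):Int) = 0 by norm_num, PySem.List.pyRange_one_eq_nil le_rfl]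
    simp [Spre]
  | succ m ih =>
    have hcast : ((m+1 : Nat) : Int) = ((m : Nat) : Int) + 1 := by push_cast; ring
    rw [hcast, PySem.List.pyRange_one_succ_right (by positivity), List.foldl_append, ih]
    have hc : Spre diff m + PySem.List.pyGetD diff (m : Int) 0 = Spre diff (m+1) := by
      rw [PySem.List.pyGetD_natCast, Spre, Spre, Finset.sum_range_succ]
    simp only [List.foldl_cons, List.foldl_nil, List.range_succ, List.map_append, List.map_cons,
      List.map_nil]
    rw [Prod.mk.injEq]
    constructor
    · exact hc
    · rw [hc]

theorem B_char (alley : List Int) (k : Int) :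
    (make_shades_alt alley k).length = alley.length ∧
    ∀ p : Nat, p < alley.length →
      (make_shades_alt alley k).getD p false =
        (PySem.List.pyRange 0 (alley.length : Int) 1).any (fun i => covI alley k i p) := by
  have hl0 : (List.replicate (alley.length + 1) (0:Int)).length = alley.length + 1 := by simp
  have hS0 : ∀ m : Nat, Spre (List.replicate (alley.length + 1) (0:Int)) m = 0 := by
    intro m
    unfold Spre
    apply Finset.sum_eq_zero
    intro t _
    simp [List.getD_eq_getElem?_getD]
  have hf : ∀ (d : List Int) (i : Int), i ∈ PySem.List.pyRange 0 (alley.length : Int) 1 →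
      d.length = alley.length + 1 →
      ((diffMark (alley.length : Int) k d i (PySem.List.pyGetD alley i 0)).length = alley.length + 1 ∧
        ∀ p : Nat, p < alley.length →
          Spre (diffMark (alley.length : Int) k d i (PySem.List.pyGetD alley i 0)) (p+1)
            = Spre d (p+1) + (if covI alley k i p then 1 else 0)) := by
    intro d i hi hd
    exact diffMark_step alley k d i (PySem.List.mem_pyRange_one.mp hi) hd
  have hdiff := foldl_S (N := alley.length)
    (fun d i => diffMark (alley.length : Int) k d i (PySem.List.pyGetD alley i 0))
    (PySem.List.pyRange 0 (alley.length : Int) 1)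
    (List.replicate (alley.length + 1) 0) hl0 hf
  rw [make_shades_alt]
  simp only []
  rw [scan_spec]
  refine ⟨by simp, fun p hp => ?_⟩
  rw [PySem.List.getD_map_range _ _ _ _ hp, hdiff.2 p hp, hS0 (p+1), zero_add,
    any_eq_pos_countP]


-- ===== VERDICT (by name: the statement is the Claim_ definition above) =====
theorem make_shades_spec : Claim_equal_make_shades := by
  intro alley k _
  unfold Spec_make_shades
  have hA := A_char alley k
  have hB := B_char alley k
  apply List.ext_getElem (by rw [hA.1, hB.1])
  intro p h1 h2
  have hp : p < alley.length := by rw [hA.1] at h1; exact h1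
  rw [← List.getD_eq_getElem _ false h1, ← List.getD_eq_getElem _ false h2, hA.2 p hp, hB.2 p hp]
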